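-- pv_equiv track=rewrite | github.com/WeidongJ/pythonStudy | python/test-framework/ui-automation/framework/get_time.py | convert
-- ===== SOURCE A (Python) =====
-- def convert(n):
--     num = abs(n)
--     newNum = 0
--     a = 1
--     while num > 0:
--         temp = num % 7
--         num = num // 7
--         newNum += temp * a
--         a *= 10
--     if n > 0:
--         return newNum
--     else:
--         return -newNum
-- ===== SOURCE B (Python) =====
-- def convert(n):
--     if n < 0:
--         return -_pos(-n)
--     return _pos(n)
--
-- def _pos(n):
--     if n < 7:
--         return n
--     return _pos(n // 7) * 10 + n % 7
-- ===== Notes on version B (the rewrite author's own statement) =====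
-- stated objective: alternative
-- what changed: Replaces the while-loop with a running place-value multiplier by a direct recursion on the quotient by the base that reassembles the base-7 digits on the way back up, with the sign handled once at the top.
import Mathlib
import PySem

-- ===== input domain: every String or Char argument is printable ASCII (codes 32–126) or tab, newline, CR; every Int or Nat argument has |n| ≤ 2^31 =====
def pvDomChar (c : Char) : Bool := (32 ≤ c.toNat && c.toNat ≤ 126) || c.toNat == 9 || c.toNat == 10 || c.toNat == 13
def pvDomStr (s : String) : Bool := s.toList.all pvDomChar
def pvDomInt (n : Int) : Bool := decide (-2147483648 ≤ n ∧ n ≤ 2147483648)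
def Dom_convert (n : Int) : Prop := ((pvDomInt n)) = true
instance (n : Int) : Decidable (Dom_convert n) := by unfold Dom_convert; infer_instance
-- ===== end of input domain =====

-- B replaces A's while-loop with a place-value multiplier by a direct recursion on the quotient by the base (alternative decomposition, same cost).


-- ===== PORT A =====
-- while num > 0: temp = num % 7; num = num // 7; newNum += temp * a; a *= 10
def convertLoop (num newNum a : Int) : Int :=
  if h : num > 0 then
    convertLoop (PySem.Int.floordiv num 7) (newNum + (PySem.Int.mod num 7) * a) (a * 10)
  else
    newNum
termination_by num.toNat
decreasing_by
  rw [PySem.Int.floordiv_eq_ediv_of_pos (by omega)]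
  omega

def convert (n : Int) : Int :=
  let newNum := convertLoop |n| 0 1
  if n > 0 then newNum else -newNum

-- ===== PORT B =====
def posAlt (n : Int) : Int :=
  if h : n < 7 then n
  else posAlt (PySem.Int.floordiv n 7) * 10 + PySem.Int.mod n 7
termination_by n.toNat
decreasing_by
  rw [PySem.Int.floordiv_eq_ediv_of_pos (by omega)]
  omega

def convert_alt (n : Int) : Int :=
  if n < 0 then -posAlt (-n) else posAlt n

-- ===== PRECONDITION & SPEC =====
def Spec_convert (n : Int) (out : Int) : Prop := out = convert_alt n
instance (n : Int) (out : Int) : Decidable (Spec_convert n out) := by unfold Spec_convert; infer_instance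

-- ===== CLAIM (what is proved, stated in full; the proofs are below) =====
def Claim_equal_convert : Prop := ∀ (n : Int), Dom_convert n → Spec_convert n (convert n)

-- ===== LEMMAS AND PROOFS =====

theorem posAlt_zero : posAlt 0 = 0 := by rw [posAlt]; simp

-- Loop invariant: for num ≥ 0, the loop computes newNum + a * posAlt num.
theorem convertLoop_eq (k : Nat) : ∀ (num newNum a : Int), 0 ≤ num → num.toNat ≤ k →
    convertLoop num newNum a = newNum + a * posAlt num := by
  induction k with
  | zero =>
    intro num newNum a h hk
    have : num = 0 := by omega
    subst this
    rw [convertLoop, posAlt]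
    simp
  | succ k ih =>
    intro num newNum a h hk
    rw [convertLoop, posAlt]
    by_cases hp : num > 0
    · have hd : PySem.Int.floordiv num 7 = num / 7 := PySem.Int.floordiv_eq_ediv_of_pos (by omega)
      have hm : PySem.Int.mod num 7 = num % 7 := PySem.Int.mod_eq_emod_of_pos (by omega)
      rw [dif_pos hp]
      rw [ih _ _ _ (by rw [hd]; omega) (by rw [hd]; omega)]
      by_cases h7 : num < 7
      · have hq : num / 7 = 0 := by omega
        rw [dif_pos h7]
        simp only [hd, hm, hq, posAlt_zero]
        have : num % 7 = num := by omega
        rw [this]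
        ring
      · rw [dif_neg h7, hd, hm]
        ring
    · have : num = 0 := by omega
      subst this
      rw [dif_neg hp, dif_pos (by norm_num)]
      simp
theorem convertLoop_abs (n : Int) : convertLoop |n| 0 1 = posAlt |n| := by
  rw [convertLoop_eq |n|.toNat |n| 0 1 (abs_nonneg n) (le_refl _)]
  ring

-- ===== VERDICT (by name: the statement is the Claim_ definition above) =====
theorem convert_spec : Claim_equal_convert := by
  intro n _
  unfold Spec_convert convert convert_alt
  by_cases hn : n > 0
  · rw [if_pos hn, if_neg (by omega), convertLoop_abs, abs_of_pos hn]
  · rw [if_neg hn]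
    by_cases hz : n < 0
    · rw [if_pos hz, convertLoop_abs, abs_of_neg hz]
    · have : n = 0 := by omega
      subst this
      rw [convertLoop, posAlt_zero]
      simp
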